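-- pv_equiv track=rewrite | github.com/SpiNNakerManchester/PACMAN | pacman/utilities/md_math.py | calc_core_index
-- ===== SOURCE A (Python) =====
-- def calc_core_index(core_indexes, full_size, neurons_per_cores):
--     n_dimensions = len(core_indexes)
--
--     # Work out the core index
--     core_index = 0
--     cum_cores_per_size = 1
--     for n in range(n_dimensions):
--         core_index += cum_cores_per_size * core_indexes[n]
--         cores_per_size = full_size[n] // neurons_per_cores[n]
--         cum_cores_per_size *= cores_per_size
--     return core_index
-- ===== SOURCE B (Python) =====
-- def calc_core_index(core_indexes, full_size, neurons_per_cores):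
--     # Pair each digit with its radix up front, then fold one Horner
--     # accumulator over the triples from the highest dimension down.
--     n = len(core_indexes)
--     triples = list(zip(core_indexes, full_size[:n], neurons_per_cores[:n]))
--     acc = 0
--     for d, f, c in reversed(triples):
--         acc = acc * (f // c) + d
--     return acc
-- ===== Notes on version B (the rewrite author's own statement) =====
-- stated objective: alternative
-- what changed: Instead of a forward indexed loop carrying a running sum plus a cumulative-product weight, B zips digits with their radices once and folds a single Horner accumulator over the zipped triples in reverse, with no index arithmetic and no weight variable.
import Mathlib
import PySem

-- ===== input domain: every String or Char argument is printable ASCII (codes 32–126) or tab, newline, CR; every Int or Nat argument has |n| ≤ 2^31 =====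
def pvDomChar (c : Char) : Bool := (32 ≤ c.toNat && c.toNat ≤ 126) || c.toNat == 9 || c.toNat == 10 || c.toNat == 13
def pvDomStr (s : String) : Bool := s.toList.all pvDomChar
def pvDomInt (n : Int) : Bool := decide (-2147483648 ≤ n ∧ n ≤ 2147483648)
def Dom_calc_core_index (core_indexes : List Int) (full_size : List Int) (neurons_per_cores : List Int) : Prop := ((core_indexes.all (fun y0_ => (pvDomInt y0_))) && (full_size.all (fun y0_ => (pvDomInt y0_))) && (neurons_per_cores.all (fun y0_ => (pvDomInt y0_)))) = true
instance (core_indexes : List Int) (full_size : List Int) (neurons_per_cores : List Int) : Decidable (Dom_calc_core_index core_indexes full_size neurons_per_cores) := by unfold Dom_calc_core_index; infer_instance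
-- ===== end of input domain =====

-- B zips digits with their radices and folds one Horner accumulator over the triples in reverse, replacing A's forward indexed loop with a cumulative-product weight (alternative decomposition, same cost).


-- ===== PORT A =====
def calc_core_index (core_indexes : List Int) (full_size : List Int) (neurons_per_cores : List Int) : Int :=
  ((PySem.List.pyRange 0 (core_indexes.length : Int) 1).foldl
    (fun (st : Int × Int) n =>
      (st.1 + st.2 * PySem.List.pyGetD core_indexes n 0,
       st.2 * PySem.Int.floordiv (PySem.List.pyGetD full_size n 0) (PySem.List.pyGetD neurons_per_cores n 0)))
    (0, 1)).1

-- ===== PORT B =====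
def calc_core_index_alt (core_indexes : List Int) (full_size : List Int) (neurons_per_cores : List Int) : Int :=
  ((core_indexes.zip ((full_size.take core_indexes.length).zip
      (neurons_per_cores.take core_indexes.length))).reverse).foldl
    (fun acc t => acc * PySem.Int.floordiv t.2.1 t.2.2 + t.1) 0

-- ===== PRECONDITION & SPEC =====
-- Pre_ excludes exactly the inputs where Python A raises: IndexError when full_size or
-- neurons_per_cores is shorter than core_indexes, ZeroDivisionError when a used divisor is 0.
def Pre_calc_core_index (core_indexes : List Int) (full_size : List Int) (neurons_per_cores : List Int) : Prop :=
  core_indexes.length ≤ full_size.length ∧ core_indexes.length ≤ neurons_per_cores.length ∧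
    ∀ x ∈ neurons_per_cores.take core_indexes.length, x ≠ 0
instance (core_indexes : List Int) (full_size : List Int) (neurons_per_cores : List Int) : Decidable (Pre_calc_core_index core_indexes full_size neurons_per_cores) := by unfold Pre_calc_core_index; infer_instance
def pvWitness_calc_core_index : List Int × List Int × List Int := ([1, 2], [10, 12], [5, 4])

def Spec_calc_core_index (core_indexes : List Int) (full_size : List Int) (neurons_per_cores : List Int) (out : Int) : Prop := out = calc_core_index_alt core_indexes full_size neurons_per_cores
instance (core_indexes : List Int) (full_size : List Int) (neurons_per_cores : List Int) (out : Int) : Decidable (Spec_calc_core_index core_indexes full_size neurons_per_cores out) := by unfold Spec_calc_core_index; infer_instance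

-- ===== CLAIM (what is proved, stated in full; the proofs are below) =====
def Claim_equal_calc_core_index : Prop := ∀ (core_indexes : List Int) (full_size : List Int) (neurons_per_cores : List Int), Dom_calc_core_index core_indexes full_size neurons_per_cores → Pre_calc_core_index core_indexes full_size neurons_per_cores → Spec_calc_core_index core_indexes full_size neurons_per_cores (calc_core_index core_indexes full_size neurons_per_cores)

-- ===== LEMMAS AND PROOFS =====

-- weight of dimension n: product of full_size[i] // neurons_per_cores[i] for i < n
def pvW (full_size neurons_per_cores : List Int) : Nat → Int
  | 0 => 1
  | n + 1 => pvW full_size neurons_per_cores n *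
      PySem.Int.floordiv (PySem.List.pyGetD full_size (n : Int) 0) (PySem.List.pyGetD neurons_per_cores (n : Int) 0)

-- the mixed-radix value of the first n digits, weighted forward (A's shape)
def pvS (core_indexes full_size neurons_per_cores : List Int) : Nat → Int
  | 0 => 0
  | n + 1 => pvS core_indexes full_size neurons_per_cores n +
      pvW full_size neurons_per_cores n * PySem.List.pyGetD core_indexes (n : Int) 0

-- structural Horner value and full radix product (B's shape)
def pvH : List Int → List Int → List Int → Int
  | d :: ds, f :: fs, c :: cs => d + PySem.Int.floordiv f c * pvH ds fs cs
  | _, _, _ => 0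

def pvP : List Int → List Int → List Int → Int
  | _ :: ds, f :: fs, c :: cs => PySem.Int.floordiv f c * pvP ds fs cs
  | _, _, _ => 1

theorem pvA_fold (ci fs npc : List Int) (n : Nat) (c w : Int) :
    (PySem.List.pyRange 0 (n : Int) 1).foldl
      (fun (st : Int × Int) i =>
        (st.1 + st.2 * PySem.List.pyGetD ci i 0,
         st.2 * PySem.Int.floordiv (PySem.List.pyGetD fs i 0) (PySem.List.pyGetD npc i 0)))
      (c, w)
    = (c + w * pvS ci fs npc n, w * pvW fs npc n) := by
  induction n generalizing c w with
  | zero => simp [PySem.List.pyRange_one_eq_nil (by omega : (0:Int) ≤ 0), pvS, pvW]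
  | succ m ih =>
    rw [show ((m + 1 : Nat) : Int) = (m : Int) + 1 by push_cast; ring,
        PySem.List.pyRange_one_succ_right (by positivity : (0:Int) ≤ (m : Int)),
        List.foldl_append, ih]
    simp [pvS, pvW]
    constructor <;> ring

theorem pvGetD_cons_natSucc (x : Int) (xs : List Int) (m : Nat) :
    PySem.List.pyGetD (x :: xs) ((m + 1 : Nat) : Int) 0 = PySem.List.pyGetD xs ((m : Nat) : Int) 0 := by
  rw [PySem.List.pyGetD_natCast, PySem.List.pyGetD_natCast, List.getD_cons_succ]

theorem pvW_shift (fs cs : List Int) (f c : Int) (j : Nat) :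
    pvW (f :: fs) (c :: cs) (j + 1) = PySem.Int.floordiv f c * pvW fs cs j := by
  induction j with
  | zero => simp [pvW, PySem.List.pyGetD_zero_cons]
  | succ m ih =>
    rw [show pvW (f :: fs) (c :: cs) (m + 1 + 1)
          = pvW (f :: fs) (c :: cs) (m + 1) *
            PySem.Int.floordiv (PySem.List.pyGetD (f :: fs) ((m + 1 : Nat) : Int) 0)
              (PySem.List.pyGetD (c :: cs) ((m + 1 : Nat) : Int) 0) from rfl,
        ih, pvGetD_cons_natSucc, pvGetD_cons_natSucc,
        show pvW fs cs (m + 1)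
          = pvW fs cs m *
            PySem.Int.floordiv (PySem.List.pyGetD fs ((m : Nat) : Int) 0)
              (PySem.List.pyGetD cs ((m : Nat) : Int) 0) from rfl]
    ring

theorem pvS_shift (ds fs cs : List Int) (d f c : Int) (k : Nat) :
    pvS (d :: ds) (f :: fs) (c :: cs) (k + 1)
      = d + PySem.Int.floordiv f c * pvS ds fs cs k := by
  induction k with
  | zero => simp [pvS, pvW, PySem.List.pyGetD_zero_cons]
  | succ m ih =>
    rw [show pvS (d :: ds) (f :: fs) (c :: cs) (m + 1 + 1)
          = pvS (d :: ds) (f :: fs) (c :: cs) (m + 1) +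
            pvW (f :: fs) (c :: cs) (m + 1) * PySem.List.pyGetD (d :: ds) ((m + 1 : Nat) : Int) 0 from rfl,
        ih, pvW_shift, pvGetD_cons_natSucc,
        show pvS ds fs cs (m + 1)
          = pvS ds fs cs m + pvW fs cs m * PySem.List.pyGetD ds ((m : Nat) : Int) 0 from rfl]
    ring

theorem pvS_eq_pvH (ci : List Int) : ∀ (fs cs : List Int),
    ci.length ≤ fs.length → ci.length ≤ cs.length →
    pvS ci fs cs ci.length = pvH ci fs cs := by
  induction ci with
  | nil => intro fs cs _ _; simp [pvS, pvH]
  | cons d ds ih =>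
    intro fs cs hf hc
    cases fs with
    | nil => simp at hf
    | cons f fs' =>
      cases cs with
      | nil => simp at hc
      | cons c cs' =>
        simp only [List.length_cons] at hf hc ⊢
        rw [pvS_shift, ih fs' cs' (by omega) (by omega), pvH]

theorem pvB_fold (ci : List Int) : ∀ (fs cs : List Int) (acc : Int),
    ci.length ≤ fs.length → ci.length ≤ cs.length →
    ((ci.zip ((fs.take ci.length).zip (cs.take ci.length))).reverse).foldl
      (fun acc t => acc * PySem.Int.floordiv t.2.1 t.2.2 + t.1) acc
    = acc * pvP ci fs cs + pvH ci fs cs := by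
  induction ci with
  | nil => intro fs cs acc _ _; simp [pvP, pvH]
  | cons d ds ih =>
    intro fs cs acc hf hc
    cases fs with
    | nil => simp at hf
    | cons f fs' =>
      cases cs with
      | nil => simp at hc
      | cons c cs' =>
        simp only [List.length_cons] at hf hc ⊢
        simp only [List.take_succ_cons, List.zip_cons_cons,
          List.reverse_cons, List.foldl_append, List.foldl_cons, List.foldl_nil]
        rw [ih fs' cs' acc (by omega) (by omega)]
        simp [pvP, pvH]
        ring

-- ===== VERDICT (by name: the statement is the Claim_ definition above) =====
theorem calc_core_index_spec : Claim_equal_calc_core_index := by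
  intro ci fs npc _ hpre
  obtain ⟨hf, hc, _⟩ := hpre
  unfold Spec_calc_core_index calc_core_index calc_core_index_alt
  rw [pvA_fold, pvB_fold ci fs npc 0 hf hc, pvS_eq_pvH ci fs npc hf hc]
  ring
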